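-- pv_equiv track=rewrite | github.com/ivekhov/algo-ya | algokraken/sprint_0/brackets_sequence/catalan_numbers_detailed.py | catalan_dp
-- ===== SOURCE A (Python) =====
-- def catalan_dp(n):
--     """
--     Динамическое программирование для вычисления всех чисел Каталана до n
--     """
--     if n == 0:
--         return [1]
--
--     catalan = [0] * (n + 1)
--     catalan[0] = catalan[1] = 1
--
--     for i in range(2, n + 1):
--         for j in range(i):
--             catalan[i] += catalan[j] * catalan[i - 1 - j]
--
--     return catalan
-- ===== SOURCE B (Python) =====
-- def catalan_dp(n):
--     """
--     All Catalan numbers up to n via the linear multiplicative recurrence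
--     C(i) = C(i-1) * 2 * (2*i - 1) // (i + 1).
--     """
--     res = [1]
--     c = 1
--     for i in range(1, n + 1):
--         c = c * 2 * (2 * i - 1) // (i + 1)
--         res.append(c)
--     return res
-- ===== Notes on version B (the rewrite author's own statement) =====
-- stated objective: faster
-- what changed: replaces the quadratic convolution DP (each C(i) summed from all earlier products) with the linear multiplicative recurrence C(i) = C(i-1)*2*(2i-1)//(i+1), one exact bigint multiply/divide per term
import Mathlib
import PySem

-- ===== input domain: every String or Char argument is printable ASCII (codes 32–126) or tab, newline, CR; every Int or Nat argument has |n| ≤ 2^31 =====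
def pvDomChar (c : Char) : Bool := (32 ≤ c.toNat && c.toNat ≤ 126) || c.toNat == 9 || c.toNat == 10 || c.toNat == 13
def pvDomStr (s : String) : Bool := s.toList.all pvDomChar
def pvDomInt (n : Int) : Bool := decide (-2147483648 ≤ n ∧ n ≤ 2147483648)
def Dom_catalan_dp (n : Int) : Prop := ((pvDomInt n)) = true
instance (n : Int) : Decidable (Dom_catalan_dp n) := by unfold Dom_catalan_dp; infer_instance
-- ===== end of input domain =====

-- B computes the same list by the linear multiplicative recurrence C(i) = C(i-1)*2*(2i-1)//(i+1),
-- one exact multiply/divide per term, instead of A's quadratic convolution DP.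

-- ===== PORT A =====
-- literal transliteration of A; list read/write via PySem.List.pyGetD/pySetD (total forms, every
-- index is in range under Pre_); [0]*(n+1) = replicate (n+1).toNat 0 since Python list
-- repetition with a non-positive count yields [].
def catalan_dp (n : Int) : List Int :=
  if n = 0 then [1]
  else
    (PySem.List.pyRange 2 (n + 1) 1).foldl (fun c i =>
      (PySem.List.pyRange 0 i 1).foldl (fun c j =>
        PySem.List.pySetD c i (PySem.List.pyGetD c i 0 +
          PySem.List.pyGetD c j 0 * PySem.List.pyGetD c (i - 1 - j) 0)) c)
      (PySem.List.pySetD (PySem.List.pySetD (List.replicate (n + 1).toNat (0 : Int)) 0 1) 1 1)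

-- ===== PORT B =====
-- literal transliteration of Source B: state = (res, c), one floordiv step per i in range(1, n+1)
def catalan_dp_alt (n : Int) : List Int :=
  ((PySem.List.pyRange 1 (n + 1) 1).foldl (fun (p : List Int × Int) i =>
      let c := PySem.Int.floordiv (p.2 * 2 * (2 * i - 1)) (i + 1)
      (p.1 ++ [c], c)) ([1], 1)).1

-- ===== PRECONDITION & SPEC =====
-- Pre_ excludes exactly the inputs where A raises: for n < 0 the list [0]*(n+1) is empty and
-- 'catalan[0] = 1' raises IndexError.
def Pre_catalan_dp (n : Int) : Prop := 0 ≤ n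
instance (n : Int) : Decidable (Pre_catalan_dp n) := by unfold Pre_catalan_dp; infer_instance
def pvWitness_catalan_dp : Int := (3)

def Spec_catalan_dp (n : Int) (out : List Int) : Prop := out = catalan_dp_alt n
instance (n : Int) (out : List Int) : Decidable (Spec_catalan_dp n out) := by unfold Spec_catalan_dp; infer_instance

-- ===== CLAIM (what is proved, stated in full; the proofs are below) =====
def Claim_equal_catalan_dp : Prop := ∀ (n : Int), Dom_catalan_dp n → Pre_catalan_dp n → Spec_catalan_dp n (catalan_dp n)

-- ===== LEMMAS AND PROOFS =====

-- the Catalan numbers as integers, and the DP state after stage i (entries < i filled, rest 0)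
def catF (t : Nat) : Int := (catalan t : Int)
def gF (i t : Nat) : Int := if t < i then catF t else 0

-- multiplicative recurrence (Mathlib's centralBinom facts), Nat form
theorem cat_mul_rec (k : Nat) :
    (k + 2) * catalan (k + 1) = 2 * (2 * k + 1) * catalan k := by
  have h1 := succ_mul_catalan_eq_centralBinom (k + 1)
  have h2 := Nat.succ_mul_centralBinom_succ k
  have h3 := succ_mul_catalan_eq_centralBinom k
  have key : (k + 1) * Nat.centralBinom (k + 1) = (k + 1) * (2 * (2 * k + 1) * catalan k) := by
    rw [h2, ← h3]; ring
  have hcb : Nat.centralBinom (k + 1) = 2 * (2 * k + 1) * catalan k :=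
    Nat.eq_of_mul_eq_mul_left (by omega) key
  have h1' : (k + 2) * catalan (k + 1) = Nat.centralBinom (k + 1) := by rw [← h1]
  rw [h1', hcb]

-- convolution recurrence, range form
theorem cat_conv (k : Nat) :
    (∑ j ∈ Finset.range (k + 1), catalan j * catalan (k - j)) = catalan (k + 1) := by
  rw [catalan_succ, ← Fin.sum_univ_eq_sum_range]

theorem cat_conv_int (i : Nat) (hi : 1 ≤ i) :
    (∑ j ∈ Finset.range i, catF j * catF (i - 1 - j)) = catF i := by
  obtain ⟨k, rfl⟩ : ∃ k, i = k + 1 := ⟨i - 1, by omega⟩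
  have h := congrArg (fun x : Nat => (x : Int)) (cat_conv k)
  push_cast at h
  simp only [catF]
  rw [← h]
  refine Finset.sum_congr rfl fun j hj => ?_
  have e : k + 1 - 1 - j = k - j := by omega
  rw [e]

-- the exact-division step of B, Int form
theorem cat_step_int (m : Nat) :
    PySem.Int.floordiv (catF m * 2 * (2 * ((m : Int) + 1) - 1)) (((m : Int) + 1) + 1)
      = catF (m + 1) := by
  have hnum : catF m * 2 * (2 * ((m : Int) + 1) - 1) = (((m : Int) + 1) + 1) * catF (m + 1) := by
    have h := congrArg (fun x : Nat => (x : Int)) (cat_mul_rec m)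
    push_cast at h
    unfold catF
    linarith [h]
  rw [hnum, PySem.Int.floordiv_eq_ediv_of_pos (by omega)]
  exact Int.mul_ediv_cancel_left _ (by omega)

-- getD on the DP state representation
theorem getD_map_range (N t : Nat) (h : Nat → Int) :
    ((List.range N).map h).getD t 0 = if t < N then h t else 0 := by
  rcases Nat.lt_or_ge t N with ht | ht
  · simp [List.getD, ht]
  · have hn : (List.range N)[t]? = none := by
      rw [List.getElem?_eq_none_iff]; simpa using ht
    simp [List.getD, Nat.not_lt.mpr ht]

theorem getD_set_self (l : List Int) (i : Nat) (v : Int) (h : i < l.length) :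
    (l.set i v).getD i 0 = v := by
  simp [List.getD, h]

theorem getD_set_ne (l : List Int) (i t : Nat) (v : Int) (h : t ≠ i) :
    (l.set i v).getD t 0 = l.getD t 0 := by
  simp [List.getD, List.getElem?_set_ne (Ne.symm h)]

theorem set_map_range (M i : Nat) (hi : i ≤ M) :
    ((List.range (M+1)).map (gF i)).set i (catF i) = (List.range (M+1)).map (gF (i+1)) := by
  apply List.ext_getElem (by simp)
  intro t h1 h2
  simp only [List.getElem_set, List.getElem_map, List.getElem_range, gF]
  split_ifs <;> first | rfl | omega | (subst_vars; rfl)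

-- the inner loop of A accumulates the convolution sum into slot i
theorem inner_aux (M i : Nat) (hi1 : 1 ≤ i) (hiM : i ≤ M) (k : Nat) (hk1 : 1 ≤ k) (hki : k ≤ i) :
    (PySem.List.pyRange 0 (k : Int) 1).foldl (fun c j =>
        PySem.List.pySetD c (i : Int) (PySem.List.pyGetD c (i : Int) 0 +
          PySem.List.pyGetD c j 0 * PySem.List.pyGetD c ((i : Int) - 1 - j) 0))
      ((List.range (M+1)).map (gF i))
    = ((List.range (M+1)).map (gF i)).set i (∑ j ∈ Finset.range k, catF j * catF (i - 1 - j)) := by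
  induction k with
  | zero => omega
  | succ k ih =>
      rcases Nat.eq_or_lt_of_le hk1 with h1 | h1
      · -- first iteration, from the untouched state
        have hk0 : k = 0 := by omega
        subst hk0
        have hr : PySem.List.pyRange 0 ((1:Nat) : Int) 1 = [0] := by
          rw [show ((1:Nat):Int) = 0 + 1 by omega, PySem.List.pyRange_one_singleton]
        rw [hr]
        simp only [List.foldl_cons, List.foldl_nil]
        have e1 : PySem.List.pyGetD ((List.range (M+1)).map (gF i)) (i : Int) 0 = 0 := by
          rw [PySem.List.pyGetD_natCast, getD_map_range]
          simp [gF]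
        have e2 : PySem.List.pyGetD ((List.range (M+1)).map (gF i)) 0 0 = catF 0 := by
          rw [PySem.List.pyGetD_zero, getD_map_range]
          simp [gF]
          intro h; omega
        have e3 : (i : Int) - 1 - 0 = ((i - 1 : Nat) : Int) := by omega
        have e4 : PySem.List.pyGetD ((List.range (M+1)).map (gF i)) ((i:Int) - 1 - 0) 0 = catF (i-1) := by
          rw [e3, PySem.List.pyGetD_natCast, getD_map_range]
          have hlt : i - 1 < M + 1 := by omega
          simp [gF, hlt]; intro h; omega
        rw [e1, e2, e4, PySem.List.pySetD_natCast]
        congr 1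
        rw [Finset.sum_range_one]
        simp
      · -- later iterations: read slots < i of the original state, accumulate into slot i
        have hsplit : PySem.List.pyRange 0 ((k+1 : Nat) : Int) 1
            = PySem.List.pyRange 0 ((k:Nat) : Int) 1 ++ [(k : Int)] := by
          have h := PySem.List.pyRange_one_succ_right (a := 0) (b := (k : Int)) (by omega)
          rw [← h]; norm_num
        rw [hsplit, List.foldl_append, ih (by omega) (by omega)]
        simp only [List.foldl_cons, List.foldl_nil]
        set L := (List.range (M+1)).map (gF i) with hL
        set S := ∑ j ∈ Finset.range k, catF j * catF (i - 1 - j) with hS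
        have hlen : i < L.length := by simp [hL]; omega
        have e1 : PySem.List.pyGetD (L.set i S) (i : Int) 0 = S := by
          rw [PySem.List.pyGetD_natCast]; exact getD_set_self L i S hlen
        have e2 : PySem.List.pyGetD (L.set i S) ((k:Nat) : Int) 0 = catF k := by
          rw [PySem.List.pyGetD_natCast, getD_set_ne L i k S (by omega), hL, getD_map_range]
          simp [gF]; omega
        have e3 : (i : Int) - 1 - ((k:Nat):Int) = ((i - 1 - k : Nat) : Int) := by omega
        have e4 : PySem.List.pyGetD (L.set i S) ((i:Int) - 1 - (k:Int)) 0 = catF (i-1-k) := by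
          rw [e3, PySem.List.pyGetD_natCast, getD_set_ne L i (i-1-k) S (by omega), hL, getD_map_range]
          have hlt : i - 1 - k < M + 1 := by omega
          simp [gF, hlt]; intro h; omega
        rw [e1, e2, e4, PySem.List.pySetD_natCast, List.set_set]
        congr 1
        rw [Finset.sum_range_succ]

-- the outer loop of A: after processing i = 2 .. 2+d-1 the state is gF (2+d)
theorem outer_aux (M : Nat) (d : Nat) (hd : 2 + d ≤ M + 1) :
    (PySem.List.pyRange 2 ((2 + d : Nat) : Int) 1).foldl (fun c i =>
        (PySem.List.pyRange 0 i 1).foldl (fun c j =>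
          PySem.List.pySetD c i (PySem.List.pyGetD c i 0 +
            PySem.List.pyGetD c j 0 * PySem.List.pyGetD c (i - 1 - j) 0)) c)
      ((List.range (M+1)).map (gF 2))
    = (List.range (M+1)).map (gF (2 + d)) := by
  induction d with
  | zero =>
      rw [PySem.List.pyRange_one_eq_nil (by norm_num)]
      simp
  | succ d ih =>
      have hsplit : PySem.List.pyRange 2 ((2 + (d+1) : Nat) : Int) 1
          = PySem.List.pyRange 2 ((2 + d : Nat) : Int) 1 ++ [((2 + d : Nat) : Int)] := by
        have h := PySem.List.pyRange_one_succ_right (a := 2) (b := ((2 + d : Nat) : Int)) (by omega)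
        rw [← h]; congr 1
      rw [hsplit, List.foldl_append, ih (by omega)]
      simp only [List.foldl_cons, List.foldl_nil]
      rw [inner_aux M (2 + d) (by omega) (by omega) (2 + d) (by omega) (by omega)]
      rw [cat_conv_int (2 + d) (by omega)]
      rw [set_map_range M (2 + d) (by omega)]
      rfl

-- full characterisation of A for n = M ≥ 1
theorem a_char (M : Nat) (hM : 1 ≤ M) :
    catalan_dp (M : Int) = (List.range (M+1)).map catF := by
  unfold catalan_dp
  rw [if_neg (by omega)]
  have htn : ((M : Int) + 1).toNat = M + 1 := by omega
  rw [htn]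
  have hs : PySem.List.pySetD (PySem.List.pySetD (List.replicate (M + 1) (0:Int)) 0 1) 1 1
      = ((List.replicate (M+1) (0:Int)).set (0:Int).toNat 1).set (1:Int).toNat 1 := by
    rw [PySem.List.pySetD_of_nonneg _ _ (by omega), PySem.List.pySetD_of_nonneg _ _ (by omega)]
  rw [hs]
  have hinit : ((List.replicate (M+1) (0:Int)).set (0:Int).toNat 1).set (1:Int).toNat 1
      = (List.range (M+1)).map (gF 2) := by
    norm_num
    apply List.ext_getElem (by simp)
    intro t h1 h2
    simp only [List.getElem_set, List.getElem_map, List.getElem_range, List.getElem_replicate, gF]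
    split_ifs <;> first | rfl | omega | (subst_vars; simp [catF])
  rw [hinit]
  have hub : (M : Int) + 1 = ((2 + (M - 1) : Nat) : Int) := by omega
  rw [hub, outer_aux M (M - 1) (by omega)]
  apply List.map_congr_left
  intro t ht
  rw [List.mem_range] at ht
  simp only [gF]
  rw [if_pos (by omega)]

-- full characterisation of B for any n = m ≥ 0
theorem alt_char (m : Nat) :
    catalan_dp_alt (m : Int) = (List.range (m+1)).map catF := by
  unfold catalan_dp_alt
  suffices h : (PySem.List.pyRange 1 ((m : Int) + 1) 1).foldl (fun (p : List Int × Int) i =>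
      let c := PySem.Int.floordiv (p.2 * 2 * (2 * i - 1)) (i + 1)
      (p.1 ++ [c], c)) ([1], 1) = ((List.range (m + 1)).map catF, catF m) by
    rw [h]
  induction m with
  | zero =>
      rw [PySem.List.pyRange_one_eq_nil (by omega)]
      simp [catF]
  | succ m ih =>
      have hsplit : PySem.List.pyRange 1 ((m + 1 : Nat) + 1 : Int) 1
          = PySem.List.pyRange 1 ((m : Int) + 1) 1 ++ [(m : Int) + 1] := by
        have h := PySem.List.pyRange_one_succ_right (a := 1) (b := (m : Int) + 1) (by omega)
        rw [← h]; norm_num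
      rw [hsplit, List.foldl_append, ih]
      have hstep := cat_step_int m
      simp only [List.foldl_cons, List.foldl_nil, hstep]
      rw [List.range_succ, List.range_succ (n := m + 1), List.range_succ]
      simp

-- ===== VERDICT (by name: the statement is the Claim_ definition above) =====
theorem catalan_dp_spec : Claim_equal_catalan_dp := by
  intro n _ hpre
  unfold Pre_catalan_dp at hpre
  unfold Spec_catalan_dp
  obtain ⟨m, rfl⟩ : ∃ m : Nat, n = (m : Int) := ⟨n.toNat, by omega⟩
  rcases Nat.eq_zero_or_pos m with hm | hm
  · subst hm; decide
  · rw [a_char m hm, alt_char m]
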